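-- pv_equiv track=rewrite | github.com/avishek376/Scaler-Problem-Solving | Advanced/05 Advanced DSA : Bit Manipulations - 2 /Homework/Q1. Strange Equality/Strange Equality.py | solve
-- ===== SOURCE A (Python) =====
-- def solve(A):
--
--     x = 0
--     binLen = format(A, 'b')
--
--     for i in range(len(binLen)):
--         if A & (1 << i):
--             pass
--         else:
--             x = x | (1 << i)
--
--     y = 1 << len(binLen)
--     return x ^ y
-- ===== SOURCE B (Python) =====
-- def solve(A):
--     # closed form: masked complement of A over its binary-string length, plus the top bit
--     L = len(format(A, 'b'))
--     return ((~A) & ((1 << L) - 1)) ^ (1 << L)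
-- ===== Notes on version B (the rewrite author's own statement) =====
-- stated objective: simpler
-- what changed: Replaces the bit-by-bit loop that sets each clear bit of A with a single closed-form masked-complement expression ((~A)&((1<<L)-1))^(1<<L), keeping L = len(format(A,'b')).
import Mathlib
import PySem

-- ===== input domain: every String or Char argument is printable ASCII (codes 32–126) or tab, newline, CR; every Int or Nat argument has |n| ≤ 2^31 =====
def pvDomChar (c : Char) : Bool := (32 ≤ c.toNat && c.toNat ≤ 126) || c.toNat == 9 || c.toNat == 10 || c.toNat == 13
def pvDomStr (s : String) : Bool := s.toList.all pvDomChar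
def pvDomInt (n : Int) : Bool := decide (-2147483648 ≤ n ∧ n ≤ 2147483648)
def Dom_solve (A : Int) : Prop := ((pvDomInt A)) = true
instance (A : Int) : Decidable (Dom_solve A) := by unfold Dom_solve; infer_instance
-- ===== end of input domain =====

-- B replaces A's bit-by-bit loop with one closed-form masked-complement expression (objective: simpler).

-- ===== PORT A =====
def solve (A : Int) : Int :=
  -- x = 0; binLen = format(A, 'b')
  let binLen : String := PySem.Int.toBin A
  -- for i in range(len(binLen)): if A & (1 << i): pass else: x = x | (1 << i)
  let x : Int :=
    (PySem.List.pyRange 0 (binLen.toList.length : Int) 1).foldl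
      (fun x i =>
        if PySem.Int.band A (1 <<< i.toNat) ≠ 0 then x
        else PySem.Int.bor x (1 <<< i.toNat)) 0
  -- y = 1 << len(binLen); return x ^ y
  let y : Int := 1 <<< binLen.toList.length
  PySem.Int.bxor x y

-- ===== PORT B =====
def solve_alt (A : Int) : Int :=
  -- L = len(format(A, 'b'))
  let L : Nat := (PySem.Int.toBin A).toList.length
  -- return ((~A) & ((1 << L) - 1)) ^ (1 << L)
  PySem.Int.bxor (PySem.Int.band (Int.not A) ((1 <<< L) - 1)) (1 <<< L)

-- ===== PRECONDITION & SPEC =====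
def Spec_solve (A : Int) (out : Int) : Prop := out = solve_alt A
instance (A : Int) (out : Int) : Decidable (Spec_solve A out) := by unfold Spec_solve; infer_instance

-- ===== CLAIM (what is proved, stated in full; the proofs are below) =====
def Claim_equal_solve : Prop := ∀ (A : Int), Dom_solve A → Spec_solve A (solve A)

-- ===== LEMMAS AND PROOFS =====

-- Python's ~A as an integer
theorem pv_not_eq (A : Int) : Int.not A = -A - 1 := by
  cases A with
  | ofNat m => simp [Int.not]; omega
  | negSucc m => simp [Int.not]

-- m < 2^n → m ||| 2^n = m + 2^n
theorem pv_or_two_pow (m n : Nat) (h : m < 2 ^ n) : m ||| 2 ^ n = m + 2 ^ n := by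
  have := Nat.two_pow_add_eq_or_of_lt h 1
  simpa [Nat.lor_comm, Nat.add_comm] using this.symm

theorem pv_two_pow_cast (k : Nat) : ((2 : Int) ^ k) = ((2 ^ k : Nat) : Int) := by
  push_cast; ring

theorem pv_two_pow_sub_one_cast (k : Nat) : ((2 : Int) ^ k - 1) = ((2 ^ k - 1 : Nat) : Int) := by
  push_cast [Nat.one_le_two_pow]; ring

-- the loop invariant: the fold over range(n) produces (~A) & (2^n - 1)
theorem pv_fold_eq (A : Int) (n : Nat) :
    (PySem.List.pyRange 0 (n : Int) 1).foldl
      (fun x i =>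
        if PySem.Int.band A (1 <<< i.toNat) ≠ 0 then x
        else PySem.Int.bor x (1 <<< i.toNat)) 0
    = PySem.Int.band (Int.not A) ((1 <<< n) - 1) := by
  induction n with
  | zero =>
      simp [PySem.List.pyRange_one_eq_nil, PySem.Int.band]
  | succ n ih =>
      have hsplit : PySem.List.pyRange 0 ((n + 1 : Nat) : Int) 1
          = PySem.List.pyRange 0 (n : Int) 1 ++ [(n : Int)] := by
        push_cast
        exact PySem.List.pyRange_one_succ_right (by positivity)
      rw [hsplit, List.foldl_append, ih]
      simp only [List.foldl_cons, List.foldl_nil, Int.toNat_natCast]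
      simp only [Nat.one_shiftLeft, Nat.cast_pow, Nat.cast_ofNat]
      by_cases hA : 0 ≤ A
      · -- A ≥ 0: let a = A.toNat
        set a := A.toNat with ha
        have hAa : A = (a : Int) := by omega
        have hband : ∀ k : Nat, PySem.Int.band A ((2:Int) ^ k) = ((a &&& 2 ^ k : Nat) : Int) := by
          intro k
          rw [hAa, pv_two_pow_cast, PySem.Int.band_natCast]
        have hmask : ∀ k : Nat, PySem.Int.band (Int.not A) ((2:Int) ^ k - 1)
            = ((2 ^ k - 1 - a % 2 ^ k : Nat) : Int) := by
          intro k
          have hnot : Int.not A = -A - 1 := pv_not_eq A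
          have hlt : ¬ (0 : Int) ≤ Int.not A := by rw [hnot]; omega
          have hm : (0 : Int) ≤ (2:Int) ^ k - 1 := by
            rw [pv_two_pow_sub_one_cast]; exact Int.natCast_nonneg _
          unfold PySem.Int.band
          rw [if_neg hlt, if_pos hm]
          have h5 : -Int.not A - 1 = A := by rw [hnot]; ring
          rw [h5, pv_two_pow_sub_one_cast, Int.toNat_natCast, hAa, Int.toNat_natCast,
            Nat.land_comm, Nat.and_two_pow_sub_one_eq_mod]
        rw [hband n, hmask n, hmask (n+1)]
        have hbit := Nat.and_two_pow a n
        have hmod : a % 2 ^ (n+1) = a % 2 ^ n + 2 ^ n * (a / 2 ^ n % 2) := by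
          rw [pow_succ, Nat.mod_mul]
        have hmlt : a % 2 ^ n < 2 ^ n := Nat.mod_lt _ (by positivity)
        have htb := @Nat.testBit_eq_decide_div_mod_eq n a
        have h1 : (2:Nat) ^ (n+1) = 2 ^ n + 2 ^ n := by ring
        rcases Bool.eq_false_or_eq_true (a.testBit n) with hb | hb
        · -- bit n of A set: branch 'pass'
          have h0 : a &&& 2 ^ n = 2 ^ n := by rw [hbit, hb]; simp
          rw [h0]
          have hcond : ¬ ((2 ^ n : Nat) : Int) = 0 := by positivity
          rw [if_pos hcond]
          have hd : a / 2 ^ n % 2 = 1 := by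
            rw [hb] at htb; simpa using htb.symm
          rw [hd, Nat.mul_one] at hmod
          congr 1
          omega
        · -- bit n of A clear: x = x | 2^n
          have h0 : a &&& 2 ^ n = 0 := by rw [hbit, hb]; simp
          rw [h0]
          simp only [Nat.cast_zero, ne_eq, not_true_eq_false, if_false]
          have hd : a / 2 ^ n % 2 = 0 := by
            rw [hb] at htb
            have := htb.symm; simp at this; omega
          rw [hd, Nat.mul_zero, Nat.add_zero] at hmod
          have hm1 : 2 ^ (n+1) - 1 - a % 2 ^ (n+1) = (2 ^ n - 1 - a % 2 ^ n) + 2 ^ n := by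
            omega
          have hblt : 2 ^ n - 1 - a % 2 ^ n < 2 ^ n := by
            have h2 : (1:Nat) ≤ 2 ^ n := Nat.one_le_two_pow
            omega
          have hbor : PySem.Int.bor ((2 ^ n - 1 - a % 2 ^ n : Nat) : Int) ((2:Int) ^ n)
              = (((2 ^ n - 1 - a % 2 ^ n) ||| 2 ^ n : Nat) : Int) := by
            rw [pv_two_pow_cast]
            exact PySem.Int.bor_natCast _ _
          rw [hbor, pv_or_two_pow _ _ hblt, hm1]
      · -- A < 0: let c = (-A-1).toNat, so ~A = c ≥ 0
        set c := (-A - 1).toNat with hc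
        have hnot : Int.not A = (c : Int) := by rw [pv_not_eq]; omega
        have hband : ∀ k : Nat, PySem.Int.band A ((2:Int) ^ k)
            = ((2 ^ k - (2 ^ k &&& c) : Nat) : Int) := by
          intro k
          have hm : (0 : Int) ≤ (2:Int) ^ k := by positivity
          unfold PySem.Int.band
          rw [if_neg hA, if_pos hm, pv_two_pow_cast, Int.toNat_natCast]
        have hmask : ∀ k : Nat, PySem.Int.band (Int.not A) ((2:Int) ^ k - 1)
            = ((c % 2 ^ k : Nat) : Int) := by
          intro k
          rw [hnot, pv_two_pow_sub_one_cast, PySem.Int.band_natCast,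
            Nat.and_two_pow_sub_one_eq_mod]
        rw [hband n, hmask n, hmask (n+1)]
        have hbit : (2:Nat) ^ n &&& c = (c.testBit n).toNat * 2 ^ n := by
          rw [Nat.land_comm]; exact Nat.and_two_pow c n
        have hmod : c % 2 ^ (n+1) = c % 2 ^ n + 2 ^ n * (c / 2 ^ n % 2) := by
          rw [pow_succ, Nat.mod_mul]
        have hmlt : c % 2 ^ n < 2 ^ n := Nat.mod_lt _ (by positivity)
        have htb := @Nat.testBit_eq_decide_div_mod_eq n c
        rcases Bool.eq_false_or_eq_true (c.testBit n) with hb | hb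
        · -- bit n of c set, so A & 2^n = 0: x = x | 2^n
          have h0 : (2:Nat) ^ n &&& c = 2 ^ n := by rw [hbit, hb]; simp
          rw [h0]
          simp only [Nat.sub_self, Nat.cast_zero, ne_eq, not_true_eq_false, if_false]
          have hd : c / 2 ^ n % 2 = 1 := by rw [hb] at htb; simpa using htb.symm
          rw [hd, Nat.mul_one] at hmod
          have hbor : PySem.Int.bor ((c % 2 ^ n : Nat) : Int) ((2:Int) ^ n)
              = ((c % 2 ^ n ||| 2 ^ n : Nat) : Int) := by
            rw [pv_two_pow_cast]
            exact PySem.Int.bor_natCast _ _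
          rw [hbor, pv_or_two_pow _ _ hmlt]
          congr 1
          omega
        · -- bit n of c clear, so A & 2^n = 2^n ≠ 0: 'pass'
          have h0 : (2:Nat) ^ n &&& c = 0 := by rw [hbit, hb]; simp
          rw [h0, Nat.sub_zero]
          have hcond : ¬ ((2 ^ n : Nat) : Int) = 0 := by positivity
          rw [if_pos hcond]
          have hd : c / 2 ^ n % 2 = 0 := by
            rw [hb] at htb
            have := htb.symm; simp at this; omega
          rw [hd, Nat.mul_zero, Nat.add_zero] at hmod
          congr 1
          omega

-- ===== VERDICT (by name: the statement is the Claim_ definition above) =====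
theorem solve_spec : Claim_equal_solve := by
  intro A _
  unfold Spec_solve solve solve_alt
  simp only []
  rw [pv_fold_eq A ((PySem.Int.toBin A).toList.length)]
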